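-- pv_equiv track=rewrite | github.com/SubtleCo/lexorank | rank.py | pad_original_ranks
-- ===== SOURCE A (Python) =====
-- def pad_original_ranks(low, high):
--     padded_high = high
--     padded_low = low
--     while len(padded_low) > len(padded_high):
--         padded_high = padded_high + [0]
--     while len(padded_low) < len(padded_high):
--         padded_low = padded_low + [0]
--     return padded_low, padded_high
-- ===== SOURCE B (Python) =====
-- def pad_original_ranks(low, high):
--     n = max(len(low), len(high))
--     return low + [0] * (n - len(low)), high + [0] * (n - len(high))
-- ===== Notes on version B (the rewrite author's own statement) =====
-- stated objective: simpler
-- what changed: Replaces the two while-loops that re-concatenate a fresh list per appended zero with a one-shot closed form: compute n = max(len(low), len(high)) and append [0]*(n-len) to each list once.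
import Mathlib
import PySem

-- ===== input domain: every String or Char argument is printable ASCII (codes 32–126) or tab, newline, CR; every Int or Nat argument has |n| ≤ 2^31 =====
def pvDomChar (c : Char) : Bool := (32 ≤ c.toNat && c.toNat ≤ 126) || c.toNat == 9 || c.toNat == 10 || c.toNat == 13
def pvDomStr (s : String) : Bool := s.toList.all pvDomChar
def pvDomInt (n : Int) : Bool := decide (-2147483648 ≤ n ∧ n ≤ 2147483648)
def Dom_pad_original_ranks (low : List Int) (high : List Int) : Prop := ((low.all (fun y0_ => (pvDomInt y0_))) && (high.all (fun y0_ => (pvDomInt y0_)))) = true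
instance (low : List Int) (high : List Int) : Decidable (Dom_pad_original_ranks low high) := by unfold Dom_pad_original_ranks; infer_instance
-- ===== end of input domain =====

-- B replaces A's two append-one-zero-per-iteration while-loops with a single closed-form
-- concatenation per list (objective: simpler); return-value equivalence only (A may return an input list itself).
-- ===== PORT A =====
-- while len(a) > len(b): b = b + [0]   (A's loop shape, one zero appended per iteration)
def padGrow (a : List Int) (b : List Int) : List Int :=
  if a.length > b.length then padGrow a (b ++ [0]) else b
termination_by a.length - b.length
decreasing_by simp_all; omega

def pad_original_ranks (low : List Int) (high : List Int) : List Int × List Int :=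
  let padded_high := padGrow low high
  let padded_low := padGrow padded_high low
  (padded_low, padded_high)

-- ===== PORT B =====
def pad_original_ranks_alt (low : List Int) (high : List Int) : List Int × List Int :=
  let n := max low.length high.length
  (low ++ List.replicate (n - low.length) 0, high ++ List.replicate (n - high.length) 0)

-- ===== PRECONDITION & SPEC =====
def Spec_pad_original_ranks (low : List Int) (high : List Int) (out : List Int × List Int) : Prop := out = pad_original_ranks_alt low high
instance (low : List Int) (high : List Int) (out : List Int × List Int) : Decidable (Spec_pad_original_ranks low high out) := by unfold Spec_pad_original_ranks; infer_instance

-- ===== CLAIM (what is proved, stated in full; the proofs are below) =====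
def Claim_equal_pad_original_ranks : Prop := ∀ (low : List Int) (high : List Int), Dom_pad_original_ranks low high → Spec_pad_original_ranks low high (pad_original_ranks low high)

-- ===== LEMMAS AND PROOFS =====

-- ===== VERDICT (by name: the statement is the Claim_ definition above) =====
lemma padGrow_eq (a b : List Int) : padGrow a b = b ++ List.replicate (a.length - b.length) 0 := by
  by_cases h : a.length > b.length
  · rw [padGrow, if_pos h, padGrow_eq a (b ++ [0])]
    have : a.length - b.length = (a.length - (b.length+1)) + 1 := by omega
    rw [this]
    simp [List.replicate_succ, List.append_assoc]
  · rw [padGrow, if_neg h]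
    have : a.length - b.length = 0 := by omega
    simp [this]
termination_by a.length - b.length
decreasing_by simp_all; omega

theorem pad_original_ranks_spec : Claim_equal_pad_original_ranks := by
  intro low high _
  unfold Spec_pad_original_ranks pad_original_ranks pad_original_ranks_alt
  simp only [padGrow_eq, List.length_append, List.length_replicate]
  have h1 : high.length + (low.length - high.length) - low.length = max low.length high.length - low.length := by omega
  have h2 : low.length - high.length = max low.length high.length - high.length := by omega
  rw [h1, h2]
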